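-- pv_equiv track=rewrite | github.com/graphsignal/solver-demo | solutions/10-C.py | count_false_positives
-- ===== SOURCE A (Python) =====
-- def digital_root(n):
--     return (n - 1) % 9 + 1 if n != 0 else 0
--
-- def count_false_positives(N):
--     count = 0
--     for A in range(1, N + 1):
--         for B in range(1, N + 1):
--             AB = A * B
--             dr_AB = digital_root(AB)
--             for C in range(1, N + 1):
--                 if AB != C:
--                     dr_C = digital_root(C)
--                     # Check Billy's condition
--                     if dr_AB == dr_C:
--                         count += 1
--     return count
-- ===== SOURCE B (Python) =====
-- def count_false_positives(N):
--     # bucket digital roots of C once, then O(N^2) over (A, B)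
--     bucket = {}
--     for C in range(1, N + 1):
--         dr = (C - 1) % 9 + 1
--         bucket[dr] = bucket.get(dr, 0) + 1
--     total = 0
--     for A in range(1, N + 1):
--         for B in range(1, N + 1):
--             AB = A * B
--             total += bucket.get((AB - 1) % 9 + 1, 0) - (1 if AB <= N else 0)
--     return total
-- ===== Notes on version B (the rewrite author's own statement) =====
-- stated objective: faster
-- what changed: Replaces the innermost loop over C by a precomputed digital-root counter: per (A,B) it adds the bucket count for dr(A*B) minus a self-exclusion when A*B <= N, turning O(N^3) into O(N^2).
import Mathlib
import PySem

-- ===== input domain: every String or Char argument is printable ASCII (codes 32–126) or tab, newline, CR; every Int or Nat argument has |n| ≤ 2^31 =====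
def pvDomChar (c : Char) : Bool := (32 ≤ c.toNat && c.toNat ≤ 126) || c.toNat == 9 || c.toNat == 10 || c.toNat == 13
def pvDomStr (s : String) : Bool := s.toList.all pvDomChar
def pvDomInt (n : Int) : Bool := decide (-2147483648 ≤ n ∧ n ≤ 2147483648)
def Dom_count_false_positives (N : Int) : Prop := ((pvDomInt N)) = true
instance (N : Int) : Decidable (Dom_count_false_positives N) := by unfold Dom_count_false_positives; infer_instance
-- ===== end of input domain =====

-- B replaces A's innermost C-loop by a digital-root counter built once (asymptotic speed-up O(N^3) → O(N^2)).

-- ===== PORT A =====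
def digital_root (n : Int) : Int :=
  if n ≠ 0 then PySem.Int.mod (n - 1) 9 + 1 else 0

def count_false_positives (N : Int) : Int :=
  (PySem.List.pyRange 1 (N + 1) 1).foldl (fun count A =>
    (PySem.List.pyRange 1 (N + 1) 1).foldl (fun count B =>
      let AB := A * B
      let dr_AB := digital_root AB
      (PySem.List.pyRange 1 (N + 1) 1).foldl (fun count C =>
        if AB ≠ C then
          (if dr_AB = digital_root C then count + 1 else count)
        else count) count) count) 0

-- ===== PORT B =====
def count_false_positives_alt (N : Int) : Int :=
  let bucket := (PySem.List.pyRange 1 (N + 1) 1).foldl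
    (fun d C =>
      let dr := PySem.Int.mod (C - 1) 9 + 1
      d.insert dr (d.getD dr 0 + 1)) PySem.Dict.empty
  (PySem.List.pyRange 1 (N + 1) 1).foldl (fun total A =>
    (PySem.List.pyRange 1 (N + 1) 1).foldl (fun total B =>
      let AB := A * B
      total + (bucket.getD (PySem.Int.mod (AB - 1) 9 + 1) 0 - (if AB ≤ N then 1 else 0))) total) 0

-- ===== PRECONDITION & SPEC =====
def Spec_count_false_positives (N : Int) (out : Int) : Prop := out = count_false_positives_alt N
instance (N : Int) (out : Int) : Decidable (Spec_count_false_positives N out) := by unfold Spec_count_false_positives; infer_instance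

-- ===== CLAIM (what is proved, stated in full; the proofs are below) =====
def Claim_equal_count_false_positives : Prop := ∀ (N : Int), Dom_count_false_positives N → Spec_count_false_positives N (count_false_positives N)

-- ===== LEMMAS AND PROOFS =====
def pvKey (n : Int) : Int := PySem.Int.mod (n - 1) 9 + 1

theorem dr_eq_key (n : Int) (h : n ≠ 0) : digital_root n = pvKey n := by
  simp [digital_root, pvKey, h]

-- inner C-loop of A counts the merged predicate
theorem innerA_eq_countP (L : List Int) (AB c : Int) (drAB : Int) :
    L.foldl (fun count C =>
      if AB ≠ C then (if drAB = digital_root C then count + 1 else count) else count) c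
    = c + (L.countP (fun C => decide (AB ≠ C ∧ drAB = digital_root C)) : Int) := by
  rw [PySem.List.foldl_congr_mem (g := fun count C =>
      if AB ≠ C ∧ drAB = digital_root C then count + 1 else count)]
  · exact PySem.List.foldl_ite_add_one _ _ _
  · intro acc x hx
    by_cases h1 : AB ≠ x <;> by_cases h2 : drAB = digital_root x <;> simp [h1, h2]

theorem countP_split (L : List Int) (hpos : ∀ C ∈ L, 1 ≤ C) (hnd : L.Nodup)
    (AB : Int) (hAB : 1 ≤ AB) :
    L.countP (fun C => decide (AB ≠ C ∧ digital_root AB = digital_root C))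
      + (if AB ∈ L then 1 else 0)
    = (L.map pvKey).count (pvKey AB) := by
  induction L with
  | nil => simp
  | cons x L ih =>
    have hx1 : 1 ≤ x := hpos x (List.mem_cons_self ..)
    have hpos' : ∀ C ∈ L, 1 ≤ C := fun C hC => hpos C (List.mem_cons_of_mem _ hC)
    have hnd' : L.Nodup := hnd.of_cons
    have hdrx : digital_root x = pvKey x := dr_eq_key x (by omega)
    have hdrAB : digital_root AB = pvKey AB := dr_eq_key AB (by omega)
    have ih' := ih hpos' hnd'
    rw [List.countP_cons, List.map_cons, List.count_cons]
    by_cases hxAB : x = AB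
    · subst hxAB
      have hnotmem : x ∉ L := (List.nodup_cons.mp hnd).1
      have hpAB : (decide (x ≠ x ∧ digital_root x = digital_root x)) = false := by simp
      rw [hpAB, if_pos (List.mem_cons_self ..), ← ih', if_neg hnotmem]
      simp only [BEq.rfl, if_true, Bool.false_eq_true, if_false]
    · have hne : AB ≠ x := fun h => hxAB h.symm
      have hmem : (AB ∈ x :: L) ↔ (AB ∈ L) := by
        simp [List.mem_cons, hne]
      simp only [hmem]
      have hpx : (decide (AB ≠ x ∧ digital_root AB = digital_root x))
          = (pvKey x == pvKey AB) := by
        rw [hdrx, hdrAB]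
        by_cases hk : pvKey AB = pvKey x
        · simp [hk, hne]
        · have hk' : (pvKey x == pvKey AB) = false := by
            simp; intro h; exact hk h.symm
          simp [hk, hk']
      simp only [hpx]
      by_cases hk : (pvKey x == pvKey AB) = true <;> simp [hk] at ih' ⊢ <;> omega

theorem bucket_fold_eq (M : List Int) (d : PySem.Dict Int Int) :
    M.foldl (fun d C =>
      d.insert (PySem.Int.mod (C - 1) 9 + 1) (d.getD (PySem.Int.mod (C - 1) 9 + 1) 0 + 1)) d
    = (M.map pvKey).foldl (fun d x => d.insert x (d.getD x 0 + 1)) d := by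
  induction M generalizing d with
  | nil => rfl
  | cons x M ih =>
    simp only [List.foldl_cons, List.map_cons]
    exact ih _

theorem bucket_getD (L : List Int) (v : Int) :
    (L.foldl (fun d C =>
        d.insert (PySem.Int.mod (C - 1) 9 + 1) (d.getD (PySem.Int.mod (C - 1) 9 + 1) 0 + 1))
        PySem.Dict.empty).getD v 0
    = ((L.map pvKey).count v : Int) := by
  rw [bucket_fold_eq, PySem.Dict.getD_foldl_insert_add_one]
  simp [PySem.Dict.getD_empty]

theorem per_pair (N A B : Int) (hA : 1 ≤ A) (hB : 1 ≤ B) (acc : Int) :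
    (PySem.List.pyRange 1 (N + 1) 1).foldl (fun count C =>
        if A * B ≠ C then
          (if digital_root (A * B) = digital_root C then count + 1 else count)
        else count) acc
    = acc + (((PySem.List.pyRange 1 (N + 1) 1).foldl (fun d C =>
          d.insert (PySem.Int.mod (C - 1) 9 + 1) (d.getD (PySem.Int.mod (C - 1) 9 + 1) 0 + 1))
          PySem.Dict.empty).getD (PySem.Int.mod (A * B - 1) 9 + 1) 0
        - (if A * B ≤ N then 1 else 0)) := by
  have hAB : 1 ≤ A * B := le_trans (by norm_num) (mul_le_mul hA hB (by omega) (by omega))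
  rw [innerA_eq_countP, bucket_getD]
  have hsplit := countP_split (PySem.List.pyRange 1 (N + 1) 1)
    (fun C hC => (PySem.List.mem_pyRange_one.mp hC).1)
    (PySem.List.nodup_pyRange_one 1 (N + 1)) (A * B) hAB
  have hmem : (A * B ∈ PySem.List.pyRange 1 (N + 1) 1) ↔ (A * B ≤ N) := by
    rw [PySem.List.mem_pyRange_one]; omega
  simp only [hmem] at hsplit
  have hkey : (PySem.Int.mod (A * B - 1) 9 + 1) = pvKey (A * B) := rfl
  rw [hkey]
  split_ifs at hsplit ⊢ <;> omega

-- ===== VERDICT (by name: the statement is the Claim_ definition above) =====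
theorem count_false_positives_spec : Claim_equal_count_false_positives := by
  intro N _
  have main : (PySem.List.pyRange 1 (N + 1) 1).foldl (fun (count : Int) A =>
      (PySem.List.pyRange 1 (N + 1) 1).foldl (fun (count : Int) B =>
        (PySem.List.pyRange 1 (N + 1) 1).foldl (fun (count : Int) C =>
          if A * B ≠ C then
            (if digital_root (A * B) = digital_root C then count + 1 else count)
          else count) count) count) (0 : Int)
    = (PySem.List.pyRange 1 (N + 1) 1).foldl (fun (total : Int) A =>
        (PySem.List.pyRange 1 (N + 1) 1).foldl (fun (total : Int) B =>
          total + (((PySem.List.pyRange 1 (N + 1) 1).foldl (fun d C =>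
                d.insert (PySem.Int.mod (C - 1) 9 + 1) (d.getD (PySem.Int.mod (C - 1) 9 + 1) 0 + 1))
                PySem.Dict.empty).getD (PySem.Int.mod (A * B - 1) 9 + 1) 0
              - (if A * B ≤ N then 1 else 0))) total) (0 : Int) := by
    apply PySem.List.foldl_congr_mem
    intro acc A hA
    apply PySem.List.foldl_congr_mem
    intro acc2 B hB
    exact per_pair N A B (PySem.List.mem_pyRange_one.mp hA).1 (PySem.List.mem_pyRange_one.mp hB).1 acc2
  exact main
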